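-- pv_equiv track=rewrite | github.com/SchmidtDSE/plastics-pipeline | tasks_curve.py | standardize_results
-- ===== SOURCE A (Python) =====
-- import itertools
--
-- def standardize_results(results):
--     """Ensure all records for built models have the same attributes.
--
--     Different models will report different information about their hyperparameters. This will
--     write empty values into the model records such that all records have the same set of
--     attributes even if some are empty because they are not relevant for the model trained.
--
--     Args:
--         results: List of model records (as dictionaries) to standardize.
--
--     Returns:
--         List of dicts after standardization.
--     """
--     keys_per_row = map(lambda x: x.keys(), results)
--     keys_iter = itertools.chain(*keys_per_row)
--     keys_allowed = filter(lambda x: x != 'model', keys_iter)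
--     keys_set = sorted(set(keys_allowed))
--
--     def standardize_result(result):
--         values = map(lambda x: result.get(x, ''), keys_set)
--         return dict(zip(keys_set, values))
--
--     return [standardize_result(x) for x in results]
-- ===== SOURCE B (Python) =====
-- def standardize_results(results):
--     """Ensure all records for built models have the same attributes.
--
--     Different decomposition: sort everything once, then merge. The template is
--     obtained by sorting all non-'model' keys (with duplicates) and dropping
--     adjacent repeats in one scan; each row is produced by a two-pointer merge
--     of the sorted template against the record's own sorted non-'model' items,
--     so no per-key dictionary lookup happens at all.
--     """
--     all_keys = sorted(k for r in results for k in r if k != 'model')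
--     keys = []
--     for k in all_keys:
--         if not keys or k != keys[-1]:
--             keys.append(k)
--     rows = []
--     for r in results:
--         items = sorted(((k, v) for k, v in r.items() if k != 'model'),
--                        key=lambda kv: kv[0])
--         row = {}
--         i = 0
--         for k in keys:
--             if i < len(items) and items[i][0] == k:
--                 row[k] = items[i][1]
--                 i += 1
--             else:
--                 row[k] = ''
--         rows.append(row)
--     return rows
-- ===== Notes on version B (the rewrite author's own statement) =====
-- stated objective: alternative
-- what changed: B replaces A's set-union-then-per-key-dict-lookup plan by a sort-and-merge plan: it sorts all non-'model' keys once and drops adjacent repeats in one scan to get the template, then builds each row by a two-pointer merge of the template against the record's sorted non-'model' items, so no per-key get() lookup is performed; Pre_ only excludes association lists with duplicate keys inside one record, which cannot arise from a real Python dict (there A's first-match get and B's merge pick different occurrences).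
import Mathlib
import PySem

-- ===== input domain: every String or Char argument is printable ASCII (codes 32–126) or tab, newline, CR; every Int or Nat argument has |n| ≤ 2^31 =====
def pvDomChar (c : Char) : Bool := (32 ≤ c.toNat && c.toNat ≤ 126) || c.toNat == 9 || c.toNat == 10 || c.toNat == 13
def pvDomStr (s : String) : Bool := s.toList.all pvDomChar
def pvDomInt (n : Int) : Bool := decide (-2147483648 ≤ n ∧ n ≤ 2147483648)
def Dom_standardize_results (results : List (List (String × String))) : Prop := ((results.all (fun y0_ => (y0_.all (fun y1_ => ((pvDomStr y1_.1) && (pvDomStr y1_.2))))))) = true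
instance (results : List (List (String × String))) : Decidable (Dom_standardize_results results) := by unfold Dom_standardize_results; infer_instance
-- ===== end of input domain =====

-- B replaces the set-union-then-per-key-lookup plan by sort-and-merge: sort all keys once,
-- drop adjacent repeats, and build each row by a two-pointer merge against the record's
-- sorted items (objective: alternative; no per-key dictionary lookup).
-- ===== PORT A =====
def standardize_results (results : List (List (String × String))) : List (List (String × String)) :=
  let keys_per_row := results.map (fun x => (PySem.Dict.mk x).keys)
  let keys_iter := keys_per_row.flatten
  let keys_allowed := keys_iter.filter (fun k => k ≠ "model")
  let keys_set := PySem.List.sorted (PySem.Set.ofList keys_allowed) (fun x => x) false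
  results.map (fun x =>
    let values := keys_set.map (fun k => (PySem.Dict.mk x).getD k "")
    (PySem.Dict.ofList (keys_set.zip values)).items)

-- ===== PORT B =====
def standardize_results_alt (results : List (List (String × String))) : List (List (String × String)) :=
  let all_keys := PySem.List.sorted
    (results.flatMap (fun r => ((PySem.Dict.mk r).keys).filter (fun k => k ≠ "model")))
    (fun x => x) false
  -- one scan dropping adjacent repeats ('if not keys or k != keys[-1]: keys.append(k)')
  let keys := all_keys.foldl (fun ks k => if ks = [] ∨ ks.getLast? ≠ some k then ks ++ [k] else ks) []
  results.map (fun r =>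
    let items := PySem.List.sorted
      (((PySem.Dict.mk r).items).filter (fun kv => kv.1 ≠ "model")) (fun kv => kv.1) false
    -- two-pointer merge of keys against items
    let st := keys.foldl (fun (st : PySem.Dict String String × Nat) k =>
      match st.2, items[st.2]? with
      | i, some kv => if kv.1 = k then (st.1.insert k kv.2, i + 1) else (st.1.insert k "", i)
      | i, none => (st.1.insert k "", i)) (PySem.Dict.empty, 0)
    st.1.items)

-- ===== PRECONDITION & SPEC =====
-- Pre_ excludes association lists in which some record has duplicate keys: such lists cannot
-- arise from a real Python dict, and there A's first-match get and B's sorted merge pick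
-- different occurrences accidentally.
def Pre_standardize_results (results : List (List (String × String))) : Prop :=
  ∀ r ∈ results, (r.map Prod.fst).Nodup
instance (results : List (List (String × String))) : Decidable (Pre_standardize_results results) := by unfold Pre_standardize_results; infer_instance

def pvWitness_standardize_results : (List (List (String × String))) :=
  [[("model", "m"), ("a", "1")], [("b", "2")]]

def Spec_standardize_results (results : List (List (String × String))) (out : List (List (String × String))) : Prop := out = standardize_results_alt results
instance (results : List (List (String × String))) (out : List (List (String × String))) : Decidable (Spec_standardize_results results out) := by unfold Spec_standardize_results; infer_instance

-- ===== CLAIM (what is proved, stated in full; the proofs are below) =====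
def Claim_equal_standardize_results : Prop := ∀ (results : List (List (String × String))), Dom_standardize_results results → Pre_standardize_results results → Spec_standardize_results results (standardize_results results)

-- ===== LEMMAS AND PROOFS =====

-- the two key-collection passes produce the same list
theorem pv_keys_eq (results : List (List (String × String))) :
    ((results.map (fun x => (PySem.Dict.mk x).keys)).flatten).filter (fun k => k ≠ "model")
      = results.flatMap (fun r => ((PySem.Dict.mk r).keys).filter (fun k => k ≠ "model")) := by
  induction results with
  | nil => rfl
  | cons r t ih => simp only [List.map_cons, List.flatten_cons, List.filter_append, ih,
      List.flatMap_cons]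

-- in a strictly increasing list the last element is maximal
theorem pv_last_max (l : List String) (m : String) (hp : l.Pairwise (fun a b => a < b))
    (hl : l.getLast? = some m) : ∀ a ∈ l, a ≤ m := by
  induction l with
  | nil => simp at hl
  | cons x t ih =>
    intro a ha
    rcases List.mem_cons.mp ha with rfl | ha
    · cases t with
      | nil => simp at hl; simp [hl]
      | cons y s =>
        rw [List.getLast?_cons_cons] at hl
        exact le_of_lt ((List.pairwise_cons.mp hp).1 m (List.mem_of_getLast? hl))
    · cases t with
      | nil => simp at ha
      | cons y s =>
        rw [List.getLast?_cons_cons] at hl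
        exact ih (List.pairwise_cons.mp hp).2 hl a ha

-- the adjacent-repeat-dropping scan of a sorted list: strictly increasing, same members
theorem pv_dedup_inv (l : List String) (acc : List String)
    (haccp : acc.Pairwise (fun a b => a < b))
    (hlp : l.Pairwise (fun a b => a ≤ b))
    (hle : ∀ a ∈ acc, ∀ b ∈ l, a ≤ b) :
    (l.foldl (fun ks k => if ks = [] ∨ ks.getLast? ≠ some k then ks ++ [k] else ks) acc).Pairwise (fun a b => a < b)
    ∧ ∀ x, x ∈ l.foldl (fun ks k => if ks = [] ∨ ks.getLast? ≠ some k then ks ++ [k] else ks) acc ↔ x ∈ acc ∨ x ∈ l := by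
  induction l generalizing acc with
  | nil => simpa using haccp
  | cons k t ih =>
    simp only [List.foldl_cons]
    by_cases hc : acc = [] ∨ acc.getLast? ≠ some k
    · rw [if_pos hc]
      have hlt : ∀ a ∈ acc, a < k := by
        intro a ha
        have hne : acc ≠ [] := List.ne_nil_of_mem ha
        obtain ⟨m, hm⟩ := Option.isSome_iff_exists.mp (List.getLast?_isSome.mpr hne)
        have hmk : m ≠ k := by
          rcases hc with hc | hc
          · exact absurd hc hne
          · intro h; exact hc (h ▸ hm)
        have hm_lt_k : m < k :=
          lt_of_le_of_ne (hle m (List.mem_of_getLast? hm) k List.mem_cons_self) hmk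
        exact lt_of_le_of_lt (pv_last_max acc m haccp hm a ha) hm_lt_k
      have haccp' : (acc ++ [k]).Pairwise (fun a b => a < b) := by
        rw [List.pairwise_append]
        exact ⟨haccp, List.pairwise_singleton _ _, fun a ha b hb => by
          rw [List.mem_singleton] at hb; exact hb ▸ hlt a ha⟩
      have hle'' : ∀ a ∈ acc ++ [k], ∀ b ∈ t, a ≤ b := by
        intro a ha b hb
        rcases List.mem_append.mp ha with ha | ha
        · exact hle a ha b (List.mem_cons_of_mem _ hb)
        · rw [List.mem_singleton] at ha
          exact ha ▸ (List.pairwise_cons.mp hlp).1 b hb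
      have := ih (acc ++ [k]) haccp' (List.pairwise_cons.mp hlp).2 hle''
      refine ⟨this.1, fun x => ?_⟩
      rw [this.2, List.mem_append, List.mem_singleton, List.mem_cons]
      tauto
    · rw [if_neg hc]
      push_neg at hc
      have hk : k ∈ acc := List.mem_of_getLast? hc.2
      have := ih acc haccp (List.pairwise_cons.mp hlp).2
        (fun a ha b hb => hle a ha b (List.mem_cons_of_mem _ hb))
      refine ⟨this.1, fun x => ?_⟩
      rw [this.2, List.mem_cons]
      constructor
      · tauto
      · rintro (h | rfl | h)
        · exact Or.inl h
        · exact Or.inl hk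
        · exact Or.inr h

-- first-match lookup ignores filtered-out 'model' entries
theorem pv_getD_filter (r : List (String × String)) (k : String) (hk : k ≠ "model") (d : String) :
    (PySem.Dict.mk r).getD k d
      = (PySem.Dict.mk (r.filter (fun kv => kv.1 ≠ "model"))).getD k d := by
  induction r with
  | nil => rfl
  | cons kv t ih =>
    obtain ⟨k1, v1⟩ := kv
    simp only [List.filter_cons]
    by_cases hm : k1 = "model"
    · have hne : (k1 == k) = false := by
        simp only [beq_eq_false_iff_ne, ne_eq]
        exact fun h => hk (h ▸ hm)
      simp only [hm, ne_eq, not_true_eq_false, decide_false,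
        PySem.Dict.getD_eq_get?_getD, PySem.Dict.get?_mk_cons] at *
      simp only [hne, Bool.false_eq_true, if_false]
      exact ih
    · simp only [ne_eq, hm, not_false_eq_true, decide_true, if_true,
        PySem.Dict.getD_eq_get?_getD, PySem.Dict.get?_mk_cons] at *
      by_cases hek : k1 = k
      · simp [hek]
      · have : (k1 == k) = false := by simp [hek]
        simp only [this, Bool.false_eq_true, if_false]
        exact ih

-- building a dict from distinct-key pairs just reproduces the pairs
theorem pv_ofList_nodup (ks : List String) (g : String → String) (hnd : ks.Nodup) :
    (PySem.Dict.ofList (ks.zip (ks.map g))).items = ks.map (fun k => (k, g k)) := by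
  have hz : ks.zip (ks.map g) = ks.map (fun k => (k, g k)) := by
    induction ks with
    | nil => rfl
    | cons a t ih => simp_all [List.zip_cons_cons]
  rw [hz]
  have hfresh := PySem.Dict.items_foldl_insert_fresh (l := ks) (k := fun k => k) (v := g)
    (d := (PySem.Dict.empty : PySem.Dict String String))
    (by intro a _; exact PySem.Dict.contains_empty a) (by simpa using hnd)
  rw [show (PySem.Dict.empty : PySem.Dict String String).items = [] from rfl,
      List.nil_append] at hfresh
  rw [show PySem.Dict.ofList (ks.map (fun k => (k, g k)))
      = (ks.map (fun k => (k, g k))).foldl (fun d p => d.insert p.1 p.2) PySem.Dict.empty from rfl,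
    List.foldl_map]
  exact hfresh

-- first-match lookup in a duplicate-free association list is invariant under permutation
theorem pv_get?_perm (l1 l2 : List (String × String)) (hp : l1.Perm l2)
    (hn : (l1.map Prod.fst).Nodup) (k : String) :
    (PySem.Dict.mk l1).get? k = (PySem.Dict.mk l2).get? k := by
  have hn2 : (l2.map Prod.fst).Nodup := ((hp.map Prod.fst).nodup_iff).mp hn
  have hkeys1 : (PySem.Dict.mk l1).keys = l1.map Prod.fst := by simp [PySem.Dict.keys]
  have hkeys2 : (PySem.Dict.mk l2).keys = l2.map Prod.fst := by simp [PySem.Dict.keys]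
  cases hv : (PySem.Dict.mk l1).get? k with
  | some v =>
    have hmem : (k, v) ∈ l1 := PySem.Dict.mem_items_of_get?_eq_some _ hv
    exact (PySem.Dict.get?_of_mem_items (PySem.Dict.mk l2) (hp.mem_iff.mp hmem)
      (by rw [hkeys2]; exact hn2)).symm
  | none =>
    symm
    rw [PySem.Dict.get?_eq_none_iff_not_mem_keys] at hv ⊢
    rw [hkeys2, ← (hp.map Prod.fst).mem_iff, ← hkeys1]
    exact hv

-- the two-pointer merge over a strictly increasing key template equals per-key lookup
-- in the (strictly increasing, keys-within-template) item suffix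
theorem pv_merge (items : List (String × String)) (keys : List String)
    (row : PySem.Dict String String) (i : Nat)
    (hkp : keys.Pairwise (fun a b => a < b))
    (hip : (items.drop i).Pairwise (fun a b => a.1 < b.1))
    (hmem : ∀ kv ∈ items.drop i, kv.1 ∈ keys) :
    (keys.foldl (fun (st : PySem.Dict String String × Nat) k =>
        match st.2, items[st.2]? with
        | i, some kv => if kv.1 = k then (st.1.insert k kv.2, i + 1) else (st.1.insert k "", i)
        | i, none => (st.1.insert k "", i)) (row, i)).1
      = keys.foldl (fun row k => row.insert k ((PySem.Dict.mk (items.drop i)).getD k "")) row := by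
  induction keys generalizing row i with
  | nil => rfl
  | cons k ks ih =>
    cases hio : items[i]? with
    | none =>
      have hlen : items.length ≤ i := by
        by_contra h
        push_neg at h
        simp [List.getElem?_eq_getElem h] at hio
      have hdrop : items.drop i = [] := List.drop_eq_nil_of_le hlen
      rw [List.foldl_cons]
      simp only [hio]
      rw [ih (row.insert k "") i (List.pairwise_cons.mp hkp).2
          (by rw [hdrop]; exact List.Pairwise.nil) (by rw [hdrop]; intro kv h; simp at h)]
      have hg : (PySem.Dict.mk (items.drop i)).getD k "" = "" := by rw [hdrop]; rfl
      simp only [List.foldl_cons, hg]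
    | some kv0 =>
      obtain ⟨ik, iv⟩ := kv0
      have hi : i < items.length := by
        by_contra h
        push_neg at h
        rw [List.getElem?_eq_none h] at hio
        simp at hio
      have hgi : items[i] = (ik, iv) := by
        have h2 := List.getElem?_eq_getElem hi
        rw [hio] at h2
        exact (Option.some_inj.mp h2).symm
      have hdrop : items.drop i = (ik, iv) :: items.drop (i + 1) := by
        rw [List.drop_eq_getElem_cons hi, hgi]
      have hikmem : ik ∈ k :: ks := hmem (ik, iv) (by rw [hdrop]; exact List.mem_cons_self)
      by_cases hik : ik = k
      · have hrest : (items.drop (i + 1)).Pairwise (fun a b => a.1 < b.1) :=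
          (List.pairwise_cons.mp (hdrop ▸ hip)).2
        have hhead : ∀ b ∈ items.drop (i + 1), ik < b.1 :=
          fun b hb => (List.pairwise_cons.mp (hdrop ▸ hip)).1 b hb
        have hmem' : ∀ kv ∈ items.drop (i + 1), kv.1 ∈ ks := by
          intro kv hkv
          have h1 : kv.1 ∈ k :: ks := hmem kv (by rw [hdrop]; exact List.mem_cons_of_mem _ hkv)
          rcases List.mem_cons.mp h1 with h | h
          · exact absurd (h ▸ hhead kv hkv) (by rw [hik]; exact lt_irrefl k)
          · exact h
        rw [List.foldl_cons]
        simp only [hio, hik, if_true]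
        rw [ih (row.insert k iv) (i + 1) (List.pairwise_cons.mp hkp).2 hrest hmem']
        have hg : (PySem.Dict.mk (items.drop i)).getD k "" = iv := by
          rw [hdrop, PySem.Dict.getD_eq_get?_getD, PySem.Dict.get?_mk_cons, hik]
          simp
        simp only [List.foldl_cons, hg]
        apply PySem.List.foldl_congr_mem
        intro acc x hx
        have hkx : k < x := (List.pairwise_cons.mp hkp).1 x hx
        have hne : (ik == x) = false := by
          rw [hik]
          simp [ne_of_lt hkx]
        have hgg : (PySem.Dict.mk (items.drop (i + 1))).getD x ""
            = (PySem.Dict.mk (items.drop i)).getD x "" := by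
          rw [hdrop]
          simp [PySem.Dict.getD_eq_get?_getD, PySem.Dict.get?_mk_cons, hne]
        rw [hgg]
      · have hikks : ik ∈ ks := by
          rcases List.mem_cons.mp hikmem with h | h
          · exact absurd h hik
          · exact h
        have hkik : k < ik := (List.pairwise_cons.mp hkp).1 ik hikks
        have hmem' : ∀ kv ∈ items.drop i, kv.1 ∈ ks := by
          intro kv hkv
          rcases List.mem_cons.mp (hmem kv hkv) with h | h
          · exfalso
            rcases List.mem_cons.mp (hdrop ▸ hkv) with he | he
            · rw [he] at h
              exact hik h
            · have hlt : ik < kv.1 := (List.pairwise_cons.mp (hdrop ▸ hip)).1 kv he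
              rw [h] at hlt
              exact absurd (lt_trans hkik hlt) (lt_irrefl k)
          · exact h
        rw [List.foldl_cons]
        simp only [hio]
        rw [if_neg hik, ih (row.insert k "") i (List.pairwise_cons.mp hkp).2 hip hmem']
        have hg : (PySem.Dict.mk (items.drop i)).getD k "" = "" := by
          have hnone : (PySem.Dict.mk (items.drop i)).get? k = none := by
            rw [PySem.Dict.get?_eq_none_iff_not_mem_keys]
            intro hkmem
            simp only [PySem.Dict.keys, List.mem_map] at hkmem
            obtain ⟨p, hp, hpk⟩ := hkmem
            rcases List.mem_cons.mp (hdrop ▸ hp) with he | he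
            · rw [he] at hpk
              exact hik hpk
            · have hlt : ik < p.1 := (List.pairwise_cons.mp (hdrop ▸ hip)).1 p he
              rw [hpk] at hlt
              exact absurd (lt_trans hkik hlt) (lt_irrefl k)
          rw [PySem.Dict.getD_eq_get?_getD, hnone]
          rfl
        simp only [List.foldl_cons, hg]

-- ===== VERDICT (by name: the statement is the Claim_ definition above) =====
theorem standardize_results_spec : Claim_equal_standardize_results := by
  intro results _ hpre
  unfold Spec_standardize_results standardize_results standardize_results_alt
  simp only []
  rw [← pv_keys_eq]
  set L := ((results.map (fun x => (PySem.Dict.mk x).keys)).flatten).filter (fun k => k ≠ "model") with hL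
  set all_keys := PySem.List.sorted L (fun x => x) false with hak
  set keysB := all_keys.foldl (fun ks k => if ks = [] ∨ ks.getLast? ≠ some k then ks ++ [k] else ks) [] with hkB
  have hlp : all_keys.Pairwise (fun a b => a ≤ b) := by
    simpa using PySem.List.sorted_pairwise (xs := L) (key := fun x => x)
  have hded := pv_dedup_inv all_keys [] List.Pairwise.nil hlp (by intro a ha; simp at ha)
  have hkp : keysB.Pairwise (fun a b => a < b) := hded.1
  have hmemB : ∀ x, x ∈ keysB ↔ x ∈ L := by
    intro x
    rw [hded.2]
    simp [hak, PySem.List.mem_sorted]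
  have hknd : keysB.Nodup := hkp.imp (fun h => ne_of_lt h)
  have hperm : keysB.Perm (PySem.Set.ofList L) :=
    (List.perm_ext_iff_of_nodup hknd (PySem.Set.nodup_ofList L)).mpr
      (fun x => by rw [hmemB x, PySem.Set.mem_ofList])
  have hksA : PySem.List.sorted (PySem.Set.ofList L) (fun x => x) false = keysB :=
    PySem.List.sorted_eq_of_perm_of_pairwise_lt _ _ _ hperm hkp
  rw [hksA]
  apply List.map_congr_left
  intro r hr
  have hnd_r : (r.map Prod.fst).Nodup := hpre r hr
  set items_r := PySem.List.sorted ((PySem.Dict.mk r).items.filter (fun kv => kv.1 ≠ "model"))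
    (fun kv => kv.1) false with hitems
  have hperm_r : items_r.Perm ((PySem.Dict.mk r).items.filter (fun kv => kv.1 ≠ "model")) :=
    PySem.List.sorted_perm _ _ _
  have hbase_nodup : (((PySem.Dict.mk r).items.filter (fun kv => kv.1 ≠ "model")).map Prod.fst).Nodup :=
    ((List.filter_sublist (l := r)).map Prod.fst).nodup hnd_r
  have hfst_nodup : (items_r.map Prod.fst).Nodup :=
    ((hperm_r.map Prod.fst).nodup_iff).mpr hbase_nodup
  have hple : items_r.Pairwise (fun a b => a.1 ≤ b.1) := by
    exact PySem.List.sorted_pairwise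
      (xs := (PySem.Dict.mk r).items.filter (fun kv => kv.1 ≠ "model")) (key := fun kv => kv.1)
  have hpne : items_r.Pairwise (fun a b => a.1 ≠ b.1) := (List.pairwise_map).mp hfst_nodup
  have hplt : items_r.Pairwise (fun a b => a.1 < b.1) :=
    (hple.and hpne).imp (fun h => lt_of_le_of_ne h.1 h.2)
  have hsubs : ∀ kv ∈ items_r, kv.1 ∈ keysB := by
    intro kv hkv
    have hmemf : kv ∈ (PySem.Dict.mk r).items.filter (fun kv => kv.1 ≠ "model") :=
      hperm_r.mem_iff.mp hkv
    obtain ⟨hin, hne⟩ := List.mem_filter.mp hmemf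
    rw [hmemB, hL]
    refine List.mem_filter.mpr ⟨?_, by simpa using hne⟩
    exact List.mem_flatten.mpr ⟨(PySem.Dict.mk r).keys, List.mem_map_of_mem hr,
      List.mem_map_of_mem hin⟩
  have hmerge := pv_merge items_r keysB PySem.Dict.empty 0 hkp
    (by rw [List.drop_zero]; exact hplt) (by rw [List.drop_zero]; exact hsubs)
  rw [List.drop_zero] at hmerge
  rw [hmerge]
  have hfresh := PySem.Dict.items_foldl_insert_fresh (l := keysB) (k := fun k => k)
    (v := fun k => (PySem.Dict.mk items_r).getD k "")
    (d := (PySem.Dict.empty : PySem.Dict String String))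
    (by intro a _; exact PySem.Dict.contains_empty a) (by simpa using hknd)
  rw [show (PySem.Dict.empty : PySem.Dict String String).items = [] from rfl,
      List.nil_append] at hfresh
  rw [hfresh, pv_ofList_nodup keysB (fun k => (PySem.Dict.mk r).getD k "") hknd]
  apply List.map_congr_left
  intro k hk
  have hkL : k ∈ L := (hmemB k).mp hk
  have hkm : k ≠ "model" := by
    rw [hL] at hkL
    exact of_decide_eq_true (List.mem_filter.mp hkL).2
  have h1 : (PySem.Dict.mk r).getD k ""
      = (PySem.Dict.mk ((PySem.Dict.mk r).items.filter (fun kv => kv.1 ≠ "model"))).getD k "" :=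
    pv_getD_filter r k hkm ""
  have h2 : (PySem.Dict.mk items_r).getD k ""
      = (PySem.Dict.mk ((PySem.Dict.mk r).items.filter (fun kv => kv.1 ≠ "model"))).getD k "" := by
    rw [PySem.Dict.getD_eq_get?_getD, PySem.Dict.getD_eq_get?_getD,
      pv_get?_perm items_r _ hperm_r hfst_nodup k]
  rw [h1, ← h2]
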